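-- pv_equiv track=rewrite | github.com/miliar/Code_Jam_Webscraper | solutions_python/Problem_185/469.py | solveBA
-- ===== SOURCE A (Python) =====
-- def solveBA(l):
--     res = []
--     if len(l) == 0:
--         return [""]
--
--     if l[0] == "?":
--         rlist = solveBA(l[1:])
--         for i in range(10):
--             for rs in rlist:
--                 res.append(str(i)+rs)
--     else:
--         rlist = solveBA(l[1:])
--         for rs in rlist:
--             res.append(str(l[0])+rs)
--
--     return res
-- ===== SOURCE B (Python) =====
-- import itertools
--
-- def solveBA(l):
--     choices = [[str(d) for d in range(10)] if c == "?" else [str(c)] for c in l]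
--     return ["".join(p) for p in itertools.product(*choices)]
-- ===== Notes on version B (the rewrite author's own statement) =====
-- stated objective: idiomatic
-- what changed: Replaces the recursive enumeration (slicing the list and appending in nested Python loops) by a per-position choice list expanded with a single iterative itertools.product pass and a join.
import Mathlib
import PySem

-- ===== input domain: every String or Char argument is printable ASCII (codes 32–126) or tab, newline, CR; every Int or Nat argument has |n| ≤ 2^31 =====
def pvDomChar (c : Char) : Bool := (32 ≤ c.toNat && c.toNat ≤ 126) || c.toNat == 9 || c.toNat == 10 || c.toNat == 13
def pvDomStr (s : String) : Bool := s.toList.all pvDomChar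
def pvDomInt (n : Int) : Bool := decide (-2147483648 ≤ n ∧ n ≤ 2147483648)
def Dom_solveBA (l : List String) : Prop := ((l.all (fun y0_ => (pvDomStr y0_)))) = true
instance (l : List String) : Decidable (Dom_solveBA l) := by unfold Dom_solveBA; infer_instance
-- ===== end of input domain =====

-- B replaces A's recursive append-loops by a per-position choice list folded into a Cartesian product (idiomatic, same order and cost).

-- ===== PORT A =====
-- recursion on the list; the for-loops become foldl over the same accumulating res
def solveBA (l : List String) : List String :=
  match l with
  | [] => [""]
  | c :: rest =>
    if c = "?" then
      let rlist := solveBA rest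
      (PySem.List.pyRange 0 10 1).foldl
        (fun res i => rlist.foldl (fun res rs => res ++ [PySem.Int.toStr i ++ rs]) res) []
    else
      let rlist := solveBA rest
      rlist.foldl (fun res rs => res ++ [c ++ rs]) []   -- str(l[0]) is the identity on a string

-- ===== PORT B =====
-- itertools.product(*choices) with leftmost factor slowest = right fold of flatMap/map; ''.join of a growing tuple = the ++ chain
def solveBA_alt (l : List String) : List String :=
  let choices := l.map (fun c =>
    if c = "?" then (PySem.List.pyRange 0 10 1).map PySem.Int.toStr else [c])
  choices.foldr (fun ch acc => ch.flatMap (fun x => acc.map (fun s => x ++ s))) [""]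

-- ===== PRECONDITION & SPEC =====
def Spec_solveBA (l : List String) (out : List String) : Prop := out = solveBA_alt l
instance (l : List String) (out : List String) : Decidable (Spec_solveBA l out) := by unfold Spec_solveBA; infer_instance

-- ===== CLAIM (what is proved, stated in full; the proofs are below) =====
def Claim_equal_solveBA : Prop := ∀ (l : List String), Dom_solveBA l → Spec_solveBA l (solveBA l)

-- ===== LEMMAS AND PROOFS =====
theorem solveBA_eq_alt (l : List String) : solveBA l = solveBA_alt l := by
  induction l with
  | nil => rfl
  | cons c rest ih =>
    simp only [solveBA, solveBA_alt, List.map_cons, List.foldr_cons]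
    by_cases hc : c = "?"
    · simp only [hc, if_true]
      have hinner : ∀ (acc : List String) (i : Int), i ∈ PySem.List.pyRange 0 10 1 →
          (solveBA rest).foldl (fun res rs => res ++ [PySem.Int.toStr i ++ rs]) acc =
          acc ++ (solveBA rest).map (fun rs => PySem.Int.toStr i ++ rs) := by
        intro acc i _
        exact PySem.List.foldl_append_singleton_eq_map ..
      have houter : (PySem.List.pyRange 0 10 1).foldl
          (fun res i => (solveBA rest).foldl (fun res rs => res ++ [PySem.Int.toStr i ++ rs]) res) [] =
          (PySem.List.pyRange 0 10 1).foldl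
          (fun res i => res ++ (solveBA rest).map (fun rs => PySem.Int.toStr i ++ rs)) [] :=
        PySem.List.foldl_congr_mem _ _ _ _ hinner
      rw [houter]
      rw [PySem.List.foldl_append_eq_flatMap, List.flatMap_map]
      simp [solveBA_alt] at ih
      simp [ih]
    · simp only [if_neg hc]
      rw [PySem.List.foldl_append_singleton_eq_map]
      simp [solveBA_alt] at ih
      simp [ih]

-- ===== VERDICT (by name: the statement is the Claim_ definition above) =====
theorem solveBA_spec : Claim_equal_solveBA := by
  intro l _
  unfold Spec_solveBA
  exact solveBA_eq_alt l
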